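-- pv_equiv track=rewrite | github.com/klimmm/dash | application/callbacks/filter_update_callbacks.py | get_premium_loss_state
-- ===== SOURCE A (Python) =====
-- from typing import List, Dict, Any, Optional, Tuple
--
-- def get_premium_loss_state(metrics: List[str], reporting_form: str) -> Tuple[bool, Optional[List[str]]]:
--     if not metrics:
--         return True, ['direct']
--
--     is_form_158 = reporting_form == '0420158'
--     states = {
--         ('total_premiums', 'total_losses'):
--             (True, ['direct', 'inward']) if is_form_158 else (False, ['direct', 'inward']),
--         ('ceded_premiums', 'ceded_losses', 'ceded_premiums_ratio',
--          'ceded_losses_to_ceded_premiums_ratio', 'net_premiums', 'net_losses'):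
--             (True, ['direct', 'inward']),
--         ('inward_premiums', 'inward_losses'):
--             (True, ['inward'])
--     }
--
--     result_bool = True
--     result_states = set()
--
--     # Check each metric in the input list
--     for metric in metrics:
--         found = False
--         for metrics_group, (bool_state, state_list) in states.items():
--             if metric in metrics_group:
--                 found = True
--                 # Update the boolean state
--                 result_bool = result_bool and bool_state
--                 # Always add states to the result set if they exist
--                 if state_list:
--                     result_states.update(state_list)
--                 break
--         if not found:
--             result_states.add('direct')
--
--     # If no states were collected, use default
--     if not result_states:
--         result_states.add('direct')
--
--     return result_bool, sorted(list(result_states))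
-- ===== SOURCE B (Python) =====
-- from typing import List, Optional, Tuple
--
-- def get_premium_loss_state(metrics: List[str], reporting_form: str) -> Tuple[bool, Optional[List[str]]]:
--     if not metrics:
--         return True, ['direct']
--     total = ('total_premiums', 'total_losses')
--     state_map = {
--         'total_premiums': ['direct', 'inward'],
--         'total_losses': ['direct', 'inward'],
--         'ceded_premiums': ['direct', 'inward'],
--         'ceded_losses': ['direct', 'inward'],
--         'ceded_premiums_ratio': ['direct', 'inward'],
--         'ceded_losses_to_ceded_premiums_ratio': ['direct', 'inward'],
--         'net_premiums': ['direct', 'inward'],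
--         'net_losses': ['direct', 'inward'],
--         'inward_premiums': ['inward'],
--         'inward_losses': ['inward'],
--     }
--     result_bool = reporting_form == '0420158' or not any(m in total for m in metrics)
--     result_states = set()
--     for m in metrics:
--         result_states.update(state_map.get(m, ['direct']))
--     return result_bool, sorted(result_states)
-- ===== Notes on version B (the rewrite author's own statement) =====
-- stated objective: simpler
-- what changed: Replaced the nested loop over tuple-keyed dict groups (with found-flag, break and a running AND) by a closed-form boolean (is_form_158 or no total metric present) plus a single pass uniting per-metric state lists from a flat metric->states map.
import Mathlib
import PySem

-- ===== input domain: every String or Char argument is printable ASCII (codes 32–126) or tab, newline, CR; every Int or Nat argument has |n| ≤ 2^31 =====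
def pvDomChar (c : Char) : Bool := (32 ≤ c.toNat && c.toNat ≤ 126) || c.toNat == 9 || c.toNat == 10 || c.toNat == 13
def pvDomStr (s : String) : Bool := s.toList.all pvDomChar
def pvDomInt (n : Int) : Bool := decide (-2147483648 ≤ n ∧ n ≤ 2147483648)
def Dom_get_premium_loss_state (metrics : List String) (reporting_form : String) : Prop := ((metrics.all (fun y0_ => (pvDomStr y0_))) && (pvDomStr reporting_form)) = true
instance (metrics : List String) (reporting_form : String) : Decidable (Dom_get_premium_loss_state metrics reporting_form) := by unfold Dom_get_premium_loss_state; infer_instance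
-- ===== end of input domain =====

-- B replaces A's nested group scan + running AND by a closed-form boolean and one union pass over a flat map (objective: simpler).

-- ===== PORT A =====
-- the `states` dict of A: group of metric names ↦ (bool_state, state_list), in insertion order
def pvStatesA (is_form_158 : Bool) : List (List String × (Bool × List String)) :=
  [ (["total_premiums", "total_losses"],
      if is_form_158 then (true, ["direct", "inward"]) else (false, ["direct", "inward"])),
    (["ceded_premiums", "ceded_losses", "ceded_premiums_ratio",
      "ceded_losses_to_ceded_premiums_ratio", "net_premiums", "net_losses"],
      (true, ["direct", "inward"])),
    (["inward_premiums", "inward_losses"], (true, ["inward"])) ]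

-- body of A's `for metric in metrics` loop: inner scan over the groups with break = find?
def pvStepA (is158 : Bool) (acc : Bool × PySem.Set String) (metric : String) : Bool × PySem.Set String :=
  match (pvStatesA is158).find? (fun g => g.1.contains metric) with
  | some (_, bs, sl) => (acc.1 && bs, if sl ≠ [] then PySem.Set.update acc.2 sl else acc.2)
  | none => (acc.1, PySem.Set.add acc.2 "direct")

def get_premium_loss_state (metrics : List String) (reporting_form : String) : Bool × Option (List String) :=
  if metrics = [] then (true, some ["direct"])
  else
    let is158 := reporting_form == "0420158"
    let r := metrics.foldl (pvStepA is158) (true, PySem.Set.empty)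
    let rs := if r.2 = [] then PySem.Set.add r.2 "direct" else r.2
    (r.1, some (PySem.List.sorted rs (fun x => x) false))

-- ===== PORT B =====
def pvStateMapB : PySem.Dict String (List String) :=
  PySem.Dict.ofList
    [ ("total_premiums", ["direct", "inward"]),
      ("total_losses", ["direct", "inward"]),
      ("ceded_premiums", ["direct", "inward"]),
      ("ceded_losses", ["direct", "inward"]),
      ("ceded_premiums_ratio", ["direct", "inward"]),
      ("ceded_losses_to_ceded_premiums_ratio", ["direct", "inward"]),
      ("net_premiums", ["direct", "inward"]),
      ("net_losses", ["direct", "inward"]),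
      ("inward_premiums", ["inward"]),
      ("inward_losses", ["inward"]) ]

def get_premium_loss_state_alt (metrics : List String) (reporting_form : String) : Bool × Option (List String) :=
  if metrics = [] then (true, some ["direct"])
  else
    let total : List String := ["total_premiums", "total_losses"]
    let result_bool := reporting_form == "0420158" || !(metrics.any (fun m => total.contains m))
    let result_states :=
      metrics.foldl (fun s m => PySem.Set.update s (pvStateMapB.getD m ["direct"])) PySem.Set.empty
    (result_bool, some (PySem.List.sorted result_states (fun x => x) false))

-- ===== PRECONDITION & SPEC =====
def Spec_get_premium_loss_state (metrics : List String) (reporting_form : String) (out : Bool × Option (List String)) : Prop := out = get_premium_loss_state_alt metrics reporting_form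
instance (metrics : List String) (reporting_form : String) (out : Bool × Option (List String)) : Decidable (Spec_get_premium_loss_state metrics reporting_form out) := by unfold Spec_get_premium_loss_state; infer_instance

-- ===== CLAIM (what is proved, stated in full; the proofs are below) =====
def Claim_equal_get_premium_loss_state : Prop := ∀ (metrics : List String) (reporting_form : String), Dom_get_premium_loss_state metrics reporting_form → Spec_get_premium_loss_state metrics reporting_form (get_premium_loss_state metrics reporting_form)

-- ===== LEMMAS AND PROOFS =====

-- the per-metric boolean factor of A's running AND
def pvBoolA (is158 : Bool) (m : String) : Bool :=
  if m = "total_premiums" ∨ m = "total_losses" then is158 else true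

-- the per-metric set step shared (after the pointwise lemma) by both loops
def pvSetStep (s : PySem.Set String) (m : String) : PySem.Set String :=
  PySem.Set.update s (pvStateMapB.getD m ["direct"])

-- the literal items list of B's map, for the proofs
def pvMapItems : List (String × List String) :=
  [ ("total_premiums", ["direct", "inward"]),
    ("total_losses", ["direct", "inward"]),
    ("ceded_premiums", ["direct", "inward"]),
    ("ceded_losses", ["direct", "inward"]),
    ("ceded_premiums_ratio", ["direct", "inward"]),
    ("ceded_losses_to_ceded_premiums_ratio", ["direct", "inward"]),
    ("net_premiums", ["direct", "inward"]),
    ("net_losses", ["direct", "inward"]),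
    ("inward_premiums", ["inward"]),
    ("inward_losses", ["inward"]) ]

lemma pvItems_eq : pvStateMapB.items = pvMapItems := by rfl

lemma pvStepA_eq (is158 : Bool) (b : Bool) (s : PySem.Set String) (m : String) :
    pvStepA is158 (b, s) m = (b && pvBoolA is158 m, pvSetStep s m) := by
  by_cases h1 : m = "total_premiums"
  · subst h1; cases is158 <;> rfl
  by_cases h2 : m = "total_losses"
  · subst h2; cases is158 <;> rfl
  by_cases h3 : m = "ceded_premiums"
  · subst h3; cases is158 <;> rfl
  by_cases h4 : m = "ceded_losses"
  · subst h4; cases is158 <;> rfl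
  by_cases h5 : m = "ceded_premiums_ratio"
  · subst h5; cases is158 <;> rfl
  by_cases h6 : m = "ceded_losses_to_ceded_premiums_ratio"
  · subst h6; cases is158 <;> rfl
  by_cases h7 : m = "net_premiums"
  · subst h7; cases is158 <;> rfl
  by_cases h8 : m = "net_losses"
  · subst h8; cases is158 <;> rfl
  by_cases h9 : m = "inward_premiums"
  · subst h9; cases is158 <;> rfl
  by_cases h10 : m = "inward_losses"
  · subst h10; cases is158 <;> rfl
  -- m matches no group: A adds 'direct', B's map defaults to ["direct"]
  · have hget : pvStateMapB.getD m ["direct"] = ["direct"] := by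
      have hf : List.find? (fun p => p.1 == m) pvStateMapB.items = none := by
        rw [pvItems_eq]
        apply List.find?_eq_none.mpr
        intro p hp
        simp only [pvMapItems, List.mem_cons, List.not_mem_nil, or_false] at hp
        rcases hp with h' | h' | h' | h' | h' | h' | h' | h' | h' | h' <;> subst h' <;>
          simp [Ne.symm h1, Ne.symm h2, Ne.symm h3, Ne.symm h4, Ne.symm h5, Ne.symm h6,
            Ne.symm h7, Ne.symm h8, Ne.symm h9, Ne.symm h10]
      simp [PySem.Dict.getD, PySem.Dict.get?, hf]
    simp [pvStepA, pvStatesA, pvSetStep, hget, PySem.Set.update, List.find?, pvBoolA,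
      h1, h2, h3, h4, h5, h6, h7, h8, h9, h10]

lemma pvFoldA_eq (is158 : Bool) (l : List String) (b : Bool) (s : PySem.Set String) :
    l.foldl (pvStepA is158) (b, s)
      = (l.foldl (fun b m => b && pvBoolA is158 m) b, l.foldl pvSetStep s) := by
  induction l generalizing b s with
  | nil => rfl
  | cons m t ih => simp only [List.foldl_cons, pvStepA_eq, ih]

lemma pvBool_fold (is158 : Bool) (l : List String) (b : Bool) :
    l.foldl (fun b m => b && pvBoolA is158 m) b = (b && l.all (pvBoolA is158)) := by
  induction l generalizing b with
  | nil => simp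
  | cons m t ih => simp [ih, Bool.and_assoc]

lemma pvBoolA_false (m : String) :
    pvBoolA false m = !((["total_premiums", "total_losses"] : List String).contains m) := by
  by_cases h1 : m = "total_premiums"
  · subst h1; rfl
  by_cases h2 : m = "total_losses"
  · subst h2; rfl
  · simp [pvBoolA, h1, h2]

lemma pvBool_closed (is158 : Bool) (l : List String) :
    l.all (pvBoolA is158)
      = (is158 || !(l.any (fun m => (["total_premiums", "total_losses"] : List String).contains m))) := by
  cases is158
  · induction l with
    | nil => rfl
    | cons m t ih => simp [List.all_cons, List.any_cons, pvBoolA_false, ih, Bool.not_or]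
  · simp only [Bool.true_or, List.all_eq_true]
    intro m _
    unfold pvBoolA; split <;> rfl

lemma pvGetD_ne_nil (m : String) : pvStateMapB.getD m ["direct"] ≠ [] := by
  rcases hf : List.find? (fun p => p.1 == m) pvStateMapB.items with _ | p
  · simp [PySem.Dict.getD, PySem.Dict.get?, hf]
  · have hp := List.mem_of_find?_eq_some hf
    rw [pvItems_eq] at hp
    simp only [pvMapItems, List.mem_cons, List.not_mem_nil, or_false] at hp
    rcases hp with h' | h' | h' | h' | h' | h' | h' | h' | h' | h' <;> subst h' <;>
      simp [PySem.Dict.getD, PySem.Dict.get?, hf]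

lemma pvSetStep_ne_nil (s : PySem.Set String) (m : String) : pvSetStep s m ≠ [] := by
  unfold pvSetStep
  obtain ⟨a, t, h⟩ := List.exists_cons_of_ne_nil (pvGetD_ne_nil m)
  intro hc
  have : a ∈ PySem.Set.update s (pvStateMapB.getD m ["direct"]) := by
    rw [PySem.Set.mem_update]; right; simp [h]
  rw [hc] at this; exact absurd this (List.not_mem_nil)

lemma pvFoldSet_ne_nil (l : List String) (s : PySem.Set String) (h : l ≠ []) :
    l.foldl pvSetStep s ≠ [] := by
  induction l generalizing s with
  | nil => exact absurd rfl h
  | cons m t ih =>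
    rcases t with _ | ⟨m2, t2⟩
    · exact pvSetStep_ne_nil s m
    · exact ih (pvSetStep s m) (by simp)

-- ===== VERDICT (by name: the statement is the Claim_ definition above) =====
theorem get_premium_loss_state_spec : Claim_equal_get_premium_loss_state := by
  intro metrics reporting_form _
  show get_premium_loss_state metrics reporting_form = get_premium_loss_state_alt metrics reporting_form
  unfold get_premium_loss_state get_premium_loss_state_alt
  by_cases hm : metrics = []
  · simp [hm]
  · simp only [hm, if_false]
    rw [pvFoldA_eq, pvBool_fold, pvBool_closed]
    simp only [Bool.true_and]
    rw [if_neg (pvFoldSet_ne_nil metrics PySem.Set.empty hm)]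
    rfl
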